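-- pv_equiv track=rewrite | github.com/bennylow513-bit/lmao | app.py | parse_refer_friend_summary
-- ===== SOURCE A (Python) =====
-- from typing import Dict, List
--
-- def parse_refer_friend_summary(reply: str) -> Dict[str, str]:
--     referral = {
--         "friend_name": "",
--         "friend_contact": "",
--         "preferred_studio": "",
--     }
--
--     if "Refer-a-Friend Summary:" not in reply:
--         return referral
--
--     for line in reply.splitlines():
--         clean = line.strip()
--
--         if clean.lower().startswith("- friend name:"):
--             referral["friend_name"] = clean.split(":", 1)[1].strip()
--
--         elif clean.lower().startswith("- friend contact:"):
--             referral["friend_contact"] = clean.split(":", 1)[1].strip()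
--
--         elif clean.lower().startswith("- preferred studio:"):
--             referral["preferred_studio"] = clean.split(":", 1)[1].strip()
--
--     return referral
-- ===== SOURCE B (Python) =====
-- def parse_refer_friend_summary(reply: str):
--     def last_value(lines, prefix):
--         for line in reversed(lines):
--             clean = line.strip()
--             if clean.lower().startswith(prefix):
--                 return clean.split(":", 1)[1].strip()
--         return ""
--
--     if "Refer-a-Friend Summary:" not in reply:
--         return {"friend_name": "", "friend_contact": "", "preferred_studio": ""}
--
--     lines = reply.splitlines()
--     return {
--         "friend_name": last_value(lines, "- friend name:"),
--         "friend_contact": last_value(lines, "- friend contact:"),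
--         "preferred_studio": last_value(lines, "- preferred studio:"),
--     }
-- ===== Notes on version B (the rewrite author's own statement) =====
-- stated objective: alternative
-- what changed: Replaces the single forward pass that mutates a dict through an elif chain with three independent backward scans over the lines, each returning the first (i.e. last-in-order) matching field value; no mutable dict state.
import Mathlib
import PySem

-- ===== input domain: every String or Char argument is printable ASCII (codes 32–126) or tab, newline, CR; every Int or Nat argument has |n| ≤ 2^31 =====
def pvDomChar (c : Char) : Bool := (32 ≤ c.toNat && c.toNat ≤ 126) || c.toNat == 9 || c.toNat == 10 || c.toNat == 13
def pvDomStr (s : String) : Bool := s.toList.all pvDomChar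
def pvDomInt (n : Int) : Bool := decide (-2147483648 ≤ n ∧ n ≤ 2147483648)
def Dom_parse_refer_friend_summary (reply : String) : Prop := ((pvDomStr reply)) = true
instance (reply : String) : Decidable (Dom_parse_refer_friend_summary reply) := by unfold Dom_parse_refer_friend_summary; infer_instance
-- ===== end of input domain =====

-- B replaces A's single forward pass mutating a dict through an elif chain by three
-- independent backward scans, each returning the first (= last-in-order) matching value.

-- ===== PORT A =====
-- clean.split(":", 1)[1].strip(); both callers guard with startswith("…:"), so the
-- index 1 always exists in Python; the .getD defaults are unreachable there.
def pvSplitVal (clean : String) : String :=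
  PySem.Str.strip ((PySem.List.pyGet? ((PySem.Str.splitMax? clean ":" 1).getD []) 1).getD "")

def pvStepA (d : PySem.Dict String String) (line : String) : PySem.Dict String String :=
  let clean := PySem.Str.strip line
  if PySem.Str.startswith (PySem.Str.lower clean) "- friend name:" then
    d.insert "friend_name" (pvSplitVal clean)
  else if PySem.Str.startswith (PySem.Str.lower clean) "- friend contact:" then
    d.insert "friend_contact" (pvSplitVal clean)
  else if PySem.Str.startswith (PySem.Str.lower clean) "- preferred studio:" then
    d.insert "preferred_studio" (pvSplitVal clean)
  else d

def parse_refer_friend_summary (reply : String) : List (String × String) :=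
  let referral := PySem.Dict.ofList [("friend_name", ""), ("friend_contact", ""), ("preferred_studio", "")]
  if PySem.Str.isIn "Refer-a-Friend Summary:" reply = false then referral.items
  else ((PySem.Str.splitlines reply).foldl pvStepA referral).items

-- ===== PORT B =====
-- `for line in reversed(lines): … return …; return ""` — recursion over the reversed list
def pvLastValue : List String → String → String
  | [], _ => ""
  | line :: rest, p =>
    let clean := PySem.Str.strip line
    if PySem.Str.startswith (PySem.Str.lower clean) p then pvSplitVal clean
    else pvLastValue rest p

def parse_refer_friend_summary_alt (reply : String) : List (String × String) :=
  if PySem.Str.isIn "Refer-a-Friend Summary:" reply = false then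
    [("friend_name", ""), ("friend_contact", ""), ("preferred_studio", "")]
  else
    let lines := PySem.Str.splitlines reply
    [("friend_name", pvLastValue lines.reverse "- friend name:"),
     ("friend_contact", pvLastValue lines.reverse "- friend contact:"),
     ("preferred_studio", pvLastValue lines.reverse "- preferred studio:")]

-- ===== PRECONDITION & SPEC =====
def Spec_parse_refer_friend_summary (reply : String) (out : List (String × String)) : Prop := out = parse_refer_friend_summary_alt reply
instance (reply : String) (out : List (String × String)) : Decidable (Spec_parse_refer_friend_summary reply out) := by unfold Spec_parse_refer_friend_summary; infer_instance

-- ===== CLAIM (what is proved, stated in full; the proofs are below) =====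
def Claim_equal_parse_refer_friend_summary : Prop := ∀ (reply : String), Dom_parse_refer_friend_summary reply → Spec_parse_refer_friend_summary reply (parse_refer_friend_summary reply)

-- ===== LEMMAS AND PROOFS =====

-- pvLastValue is pvLastD with default ""
def pvLastD : List String → String → String → String
  | [], _, d => d
  | line :: rest, p, d =>
    let clean := PySem.Str.strip line
    if PySem.Str.startswith (PySem.Str.lower clean) p then pvSplitVal clean
    else pvLastD rest p d

theorem pvLastD_empty (rl : List String) (p : String) : pvLastD rl p "" = pvLastValue rl p := by
  induction rl with
  | nil => rfl
  | cons l rest ih => simp [pvLastD, pvLastValue, ih]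

-- a line matches at most one of the three prefixes
theorem pvStartswith_excl (s p q : String)
    (hnpq : ¬ p.toList <+: q.toList) (hnqp : ¬ q.toList <+: p.toList)
    (h : PySem.Str.startswith s p = true) : PySem.Str.startswith s q = false := by
  simp only [PySem.Str.startswith_eq] at h ⊢
  rw [PySem.Chars.startswith_iff] at h
  by_contra hq
  rw [Bool.not_eq_false, PySem.Chars.startswith_iff] at hq
  rcases List.prefix_or_prefix_of_prefix h hq with h1 | h1
  · exact hnpq h1
  · exact hnqp h1

-- the fold of A over the lines, field by field, is B's backward search
theorem pvFold (lines : List String) (a b c : String) :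
    (lines.foldl pvStepA (PySem.Dict.ofList
        [("friend_name", a), ("friend_contact", b), ("preferred_studio", c)])).items
    = [("friend_name", pvLastD lines.reverse "- friend name:" a),
       ("friend_contact", pvLastD lines.reverse "- friend contact:" b),
       ("preferred_studio", pvLastD lines.reverse "- preferred studio:" c)] := by
  induction lines using List.reverseRecOn with
  | nil => rfl
  | append_singleton ls l ih =>
    rw [List.foldl_append, List.foldl_cons, List.foldl_nil]
    have hd : ls.foldl pvStepA (PySem.Dict.ofList
        [("friend_name", a), ("friend_contact", b), ("preferred_studio", c)])
        = PySem.Dict.mk [("friend_name", pvLastD ls.reverse "- friend name:" a),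
            ("friend_contact", pvLastD ls.reverse "- friend contact:" b),
            ("preferred_studio", pvLastD ls.reverse "- preferred studio:" c)] := by
      apply PySem.Dict.ext; exact ih
    rw [hd, List.reverse_append]
    simp only [List.reverse_singleton, List.singleton_append]
    simp only [pvStepA, pvLastD]
    by_cases h1 : PySem.Str.startswith (PySem.Str.lower (PySem.Str.strip l)) "- friend name:" = true
    · have e2 := pvStartswith_excl _ "- friend name:" "- friend contact:" (by decide) (by decide) h1
      have e3 := pvStartswith_excl _ "- friend name:" "- preferred studio:" (by decide) (by decide) h1
      simp only [h1, e2, e3, if_true, Bool.false_eq_true, if_false]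
      simp [PySem.Dict.insert]
    · by_cases h2 : PySem.Str.startswith (PySem.Str.lower (PySem.Str.strip l)) "- friend contact:" = true
      · have e3 := pvStartswith_excl _ "- friend contact:" "- preferred studio:" (by decide) (by decide) h2
        simp only [h1, h2, e3, if_true, Bool.false_eq_true, if_false]
        simp [PySem.Dict.insert]
      · by_cases h3 : PySem.Str.startswith (PySem.Str.lower (PySem.Str.strip l)) "- preferred studio:" = true
        · simp only [h3, if_true, if_neg h1, if_neg h2]
          simp [PySem.Dict.insert]
        · simp only [if_neg h1, if_neg h2, if_neg h3]

-- ===== VERDICT (by name: the statement is the Claim_ definition above) =====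
theorem parse_refer_friend_summary_spec : Claim_equal_parse_refer_friend_summary := by
  intro reply _
  unfold Spec_parse_refer_friend_summary parse_refer_friend_summary parse_refer_friend_summary_alt
  by_cases h : PySem.Str.isIn "Refer-a-Friend Summary:" reply = false
  · simp only [h, if_true]; decide
  · simp only [h]
    rw [pvFold]
    simp [pvLastD_empty]
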